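-- pv_equiv track=rewrite | github.com/afuentri/B-MyRepCLL | src/old_consensus2CDR3.py | gather_variants
-- ===== SOURCE A (Python) =====
-- def sequence_remove(variants, seq):
--
--     """"""
--     new_seq = seq
--     for i in variants:
--         pos, ref, alt = i
--         seq.replace(alt, ref)
--         post_pos = int(pos) + len(alt)
--         pre_string = seq[:int(pos)-1]
--         post_string = seq[post_pos-1:]
--         new_seq = pre_string + ref + post_string
--
--     return new_seq
--
-- def gather_variants(list_variants, sequence):
--
--     """"""
--     list_things = []
--     for i in list_variants:
--         alleles, pos = i.split(':')
--         ref, alt = alleles.split('/')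
--         list_things.append((pos, ref, alt))
--
--         sequence = sequence_remove(list_things, sequence)
--
--     return sequence
-- ===== SOURCE B (Python) =====
-- def gather_variants(list_variants, sequence):
--     # single flat pass: apply each variant directly to the running sequence
--     for i in list_variants:
--         alleles, pos = i.split(':')
--         ref, alt = alleles.split('/')
--         p = int(pos)
--         post_pos = p + len(alt)
--         sequence = sequence[:p - 1] + ref + sequence[post_pos - 1:]
--     return sequence
-- ===== Notes on version B (the rewrite author's own statement) =====
-- stated objective: faster
-- what changed: B applies each variant in one flat pass over list_variants, eliminating A's growing list_things accumulator and sequence_remove's inner re-scan of all previous variants (of which only the last tuple ever affected the result).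
import Mathlib
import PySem

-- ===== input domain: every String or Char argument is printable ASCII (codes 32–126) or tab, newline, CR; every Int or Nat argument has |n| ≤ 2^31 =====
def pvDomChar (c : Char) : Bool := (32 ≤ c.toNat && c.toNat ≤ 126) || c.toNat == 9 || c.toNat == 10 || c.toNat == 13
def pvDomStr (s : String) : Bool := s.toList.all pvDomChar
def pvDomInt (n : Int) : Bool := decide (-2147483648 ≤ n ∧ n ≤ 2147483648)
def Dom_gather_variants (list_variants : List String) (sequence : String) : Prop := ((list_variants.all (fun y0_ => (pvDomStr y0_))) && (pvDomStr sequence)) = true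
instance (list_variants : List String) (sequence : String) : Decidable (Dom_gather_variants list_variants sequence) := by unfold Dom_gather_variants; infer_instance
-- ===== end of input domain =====

-- B replaces A's quadratic re-scan (growing list_things + sequence_remove's inner loop, of
-- which only the last tuple affects the result) by one flat pass applying each variant directly.


-- Both ports work on the List Char layer (PySem.Chars), where PySem's string primitives are defined.

-- ===== PORT A =====
-- sequence_remove's loop: state is new_seq; seq never changes inside the loop; the discarded
-- 'seq.replace(alt, ref)' has no effect and is not carried. none = int(pos) ValueError.
def pvSeqRemoveGo : List (List Char × List Char × List Char) → List Char → List Char → Option (List Char)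
  | [], _seq, new_seq => some new_seq
  | (pos, ref, alt) :: rest, seq, _new_seq =>
    match PySem.Int.ofChars? pos with
    | none => none
    | some p =>
      let post_pos : Int := p + (PySem.Chars.len alt : Int)
      let pre_string := PySem.List.slice seq none (some (p - 1))
      let post_string := PySem.List.slice seq (some (post_pos - 1)) none
      pvSeqRemoveGo rest seq (pre_string ++ ref ++ post_string)

def pvSequenceRemove (variants : List (List Char × List Char × List Char)) (seq : List Char) : Option (List Char) :=
  pvSeqRemoveGo variants seq seq

-- gather_variants' loop: state is (list_things, sequence); none = ValueError
-- (unpacking a split of length ≠ 2, or int(pos) failing inside sequence_remove).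
def pvGatherGo : List (List Char) → List (List Char × List Char × List Char) → List Char → Option (List Char)
  | [], _list_things, sequence => some sequence
  | i :: rest, list_things, sequence =>
    match PySem.Chars.splitOn i [':'] with
    | [alleles, pos] =>
      match PySem.Chars.splitOn alleles ['/'] with
      | [ref, alt] =>
        let list_things' := list_things ++ [(pos, ref, alt)]
        match pvSequenceRemove list_things' sequence with
        | none => none
        | some s' => pvGatherGo rest list_things' s'
      | _ => none
    | _ => none

def gather_variants (list_variants : List String) (sequence : String) : String :=
  String.ofList ((pvGatherGo (list_variants.map String.toList) [] sequence.toList).getD sequence.toList)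

-- ===== PORT B =====
def pvAltStep (sequence : List Char) (i : List Char) : Option (List Char) :=
  match PySem.Chars.splitOn i [':'] with
  | [alleles, pos] =>
    match PySem.Chars.splitOn alleles ['/'] with
    | [ref, alt] =>
      match PySem.Int.ofChars? pos with
      | none => none
      | some p =>
        some (PySem.List.slice sequence none (some (p - 1)) ++ ref ++
          PySem.List.slice sequence (some (p + (PySem.Chars.len alt : Int) - 1)) none)
    | _ => none
  | _ => none

def gather_variants_alt (list_variants : List String) (sequence : String) : String :=
  String.ofList ((List.foldlM pvAltStep sequence.toList (list_variants.map String.toList)).getD sequence.toList)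

-- ===== PRECONDITION & SPEC =====
-- Pre_ excludes exactly the inputs where Python A raises ValueError: a variant string whose
-- ':'-split or '/'-split does not have exactly 2 parts, or whose position is not int-parsable.
def Pre_gather_variants (list_variants : List String) (_sequence : String) : Prop :=
  ∀ i ∈ list_variants,
    (PySem.Chars.splitOn i.toList [':']).length = 2 ∧
    (PySem.Chars.splitOn ((PySem.Chars.splitOn i.toList [':']).getD 0 []) ['/']).length = 2 ∧
    (PySem.Int.ofChars? ((PySem.Chars.splitOn i.toList [':']).getD 1 [])).isSome = true
instance (list_variants : List String) (sequence : String) : Decidable (Pre_gather_variants list_variants sequence) := by unfold Pre_gather_variants; infer_instance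

def pvWitness_gather_variants : List String × String := (["A/G:2", "CC/T:1"], "ACGTA")

def Spec_gather_variants (list_variants : List String) (sequence : String) (out : String) : Prop := out = gather_variants_alt list_variants sequence
instance (list_variants : List String) (sequence : String) (out : String) : Decidable (Spec_gather_variants list_variants sequence out) := by unfold Spec_gather_variants; infer_instance

-- ===== CLAIM (what is proved, stated in full; the proofs are below) =====
def Claim_equal_gather_variants : Prop := ∀ (list_variants : List String) (sequence : String), Dom_gather_variants list_variants sequence → Pre_gather_variants list_variants sequence → Spec_gather_variants list_variants sequence (gather_variants list_variants sequence)

-- ===== LEMMAS AND PROOFS =====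

-- Only the LAST tuple of list_things determines sequence_remove's result, provided all
-- earlier positions still parse (they do: they parsed when first appended).
lemma pvSeqRemoveGo_snoc (things : List (List Char × List Char × List Char))
    (t : List Char × List Char × List Char) (seq new_seq : List Char)
    (h : ∀ x ∈ things, (PySem.Int.ofChars? x.1).isSome = true) :
    pvSeqRemoveGo (things ++ [t]) seq new_seq = pvSeqRemoveGo [t] seq new_seq := by
  induction things generalizing new_seq with
  | nil => rfl
  | cons hd tl ih =>
    obtain ⟨pos, ref, alt⟩ := hd
    have hpos : (PySem.Int.ofChars? pos).isSome = true := h (pos, ref, alt) (by simp)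
    obtain ⟨p, hp⟩ := Option.isSome_iff_exists.mp hpos
    simp only [List.cons_append, pvSeqRemoveGo, hp]
    exact ih _ (fun x hx => h x (List.mem_cons_of_mem _ hx))

lemma pvGatherGo_eq (lv : List (List Char)) :
    ∀ (things : List (List Char × List Char × List Char)) (sequence : List Char),
    (∀ i ∈ lv,
      (PySem.Chars.splitOn i [':']).length = 2 ∧
      (PySem.Chars.splitOn ((PySem.Chars.splitOn i [':']).getD 0 []) ['/']).length = 2 ∧
      (PySem.Int.ofChars? ((PySem.Chars.splitOn i [':']).getD 1 [])).isSome = true) →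
    (∀ x ∈ things, (PySem.Int.ofChars? x.1).isSome = true) →
    pvGatherGo lv things sequence = List.foldlM pvAltStep sequence lv := by
  induction lv with
  | nil => intro things sequence _ _; rfl
  | cons i rest ih =>
    intro things sequence hpre hthings
    obtain ⟨h2, h2b, hparse⟩ := hpre i (by simp)
    match hsplit : PySem.Chars.splitOn i [':'] with
    | [alleles, pos] =>
      rw [hsplit] at h2b hparse
      simp only [List.getD, List.getElem?_cons_zero, List.getElem?_cons_succ,
        Option.getD_some] at h2b hparse
      match hsplit2 : PySem.Chars.splitOn alleles ['/'] with
      | [ref, alt] =>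
        obtain ⟨p, hp⟩ := Option.isSome_iff_exists.mp hparse
        have hthings' : ∀ x ∈ things ++ [(pos, ref, alt)], (PySem.Int.ofChars? x.1).isSome = true := by
          intro x hx
          rcases List.mem_append.mp hx with hx | hx
          · exact hthings x hx
          · simp only [List.mem_singleton] at hx; subst hx; simp [hp]
        simp only [pvGatherGo, hsplit, hsplit2, pvSequenceRemove,
          pvSeqRemoveGo_snoc _ _ _ _ hthings, pvSeqRemoveGo, hp]
        rw [ih _ _ (fun j hj => hpre j (List.mem_cons_of_mem _ hj)) hthings']
        simp only [List.foldlM, pvAltStep, hsplit, hsplit2, hp, Option.bind_eq_bind]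
        rfl
      | [] => rw [hsplit2] at h2b; simp at h2b
      | [_] => rw [hsplit2] at h2b; simp at h2b
      | _ :: _ :: _ :: _ => rw [hsplit2] at h2b; simp at h2b
    | [] => rw [hsplit] at h2; simp at h2
    | [_] => rw [hsplit] at h2; simp at h2
    | _ :: _ :: _ :: _ => rw [hsplit] at h2; simp at h2

-- ===== VERDICT (by name: the statement is the Claim_ definition above) =====
theorem gather_variants_spec : Claim_equal_gather_variants := by
  intro list_variants sequence _dom hpre
  unfold Spec_gather_variants gather_variants gather_variants_alt
  rw [pvGatherGo_eq (list_variants.map String.toList) [] sequence.toList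
    (by intro i hi; obtain ⟨j, hj, rfl⟩ := List.mem_map.mp hi; exact hpre j hj)
    (by simp)]
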